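-- pv_equiv track=rewrite | github.com/ridamalik1315/crypto-code | crypto_algorithms.py | permutation_decrypt
-- ===== SOURCE A (Python) =====
-- def is_valid_permutation_key(key: str) -> bool:
--     if len(key) == 0 or len(key) > 10:
--         return False
--     length = len(key)
--     for i in range(length):
--         if str(i) not in key:
--             return False
--     return True
--
-- def permutation_decrypt(cipher: str, key: str) -> str:
--     if not is_valid_permutation_key(key):
--         raise ValueError("Key must contain each index (0..n-1) exactly once and be at most length 10.")
--
--     key_len = len(key)
--     if key_len == 0 or len(cipher) % key_len != 0:
--         raise ValueError("Ciphertext length must be a multiple of the key length.")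
--
--     plain_chars: list[str] = []
--
--     for block_start in range(0, len(cipher), key_len):
--         block = cipher[block_start:block_start + key_len]
--         plain_block = [" "] * key_len
--
--         for i, ch in enumerate(block):
--             original_index = int(key[i])
--             plain_block[original_index] = ch
--
--         plain_chars.extend(plain_block)
--
--     return "".join(plain_chars).rstrip()
-- ===== SOURCE B (Python) =====
-- def permutation_decrypt(cipher: str, key: str) -> str:
--     n = len(key)
--     if n == 0 or sorted(key) != [str(i) for i in range(n)]:
--         raise ValueError("Key must contain each index (0..n-1) exactly once and be at most length 10.")
--     if len(cipher) % n != 0: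
--         raise ValueError("Ciphertext length must be a multiple of the key length.")
--
--     inv = [0] * n
--     for i, ch in enumerate(key):
--         inv[int(ch)] = i
--
--     return "".join(cipher[(p // n) * n + inv[p % n]] for p in range(len(cipher))).rstrip()
-- ===== Notes on version B (the rewrite author's own statement) =====
-- stated objective: alternative
-- what changed: Replaces the per-block scatter into a space-filled buffer (plain_block[int(key[i])] = ch) by a precomputed inverse-permutation table and a single gather comprehension over all output positions; key validity is checked by comparing sorted(key) to the digit list instead of per-digit substring search.
import Mathlib
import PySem

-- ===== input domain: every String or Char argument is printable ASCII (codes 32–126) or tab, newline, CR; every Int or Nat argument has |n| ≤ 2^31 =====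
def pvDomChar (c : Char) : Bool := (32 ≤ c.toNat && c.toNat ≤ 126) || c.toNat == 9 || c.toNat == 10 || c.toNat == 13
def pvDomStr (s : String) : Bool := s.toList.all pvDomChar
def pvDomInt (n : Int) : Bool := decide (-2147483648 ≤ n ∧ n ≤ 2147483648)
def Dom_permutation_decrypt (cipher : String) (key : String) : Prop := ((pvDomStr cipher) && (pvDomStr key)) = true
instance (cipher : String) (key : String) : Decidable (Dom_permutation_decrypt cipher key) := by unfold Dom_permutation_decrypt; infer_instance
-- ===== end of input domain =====

-- B replaces A's per-block scatter (plain_block[int(key[i])] = ch) by a precomputed inverse-permutation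
-- table and a single gather over all output positions (objective: alternative, same cost).

-- ===== PORT A =====
def is_valid_permutation_key (key : String) : Bool :=
  if PySem.Str.len key == 0 || PySem.Str.len key > 10 then false
  else
    -- 'for i in range(length): if str(i) not in key: return False' / 'return True'
    (PySem.List.pyRange 0 (PySem.Str.len key) 1).all (fun i => PySem.Str.isIn (PySem.Int.toStr i) key)

def permutation_decrypt (cipher : String) (key : String) : String :=
  if !(is_valid_permutation_key key) then ""   -- raise ValueError (excluded by Pre_)
  else
    let keyLen : Int := PySem.Str.len key
    if keyLen == 0 || !(PySem.Int.mod (PySem.Str.len cipher) keyLen == 0) then ""   -- raise ValueError (excluded by Pre_)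
    else
      let plainChars : List Char :=
        (PySem.List.pyRange 0 (PySem.Str.len cipher) keyLen).foldl (fun acc blockStart =>
          let block : List Char := (PySem.Str.slice cipher (some blockStart) (some (blockStart + keyLen))).toList
          -- plain_block = [" "] * key_len; for i, ch in enumerate(block): plain_block[int(key[i])] = ch
          -- (the valid-key guard makes key[i] / int() / the list assignment succeed, so .getD/.toNat/.set are exact here)
          let pb : List Char := (PySem.List.enumerate block 0).foldl (fun pb p =>
            pb.set ((PySem.Int.ofChars? [(PySem.Str.pyGet? key p.1).getD ' ']).getD 0).toNat p.2)
            (List.replicate keyLen.toNat ' ')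
          acc ++ pb) []
      PySem.Str.rstrip (String.ofList plainChars)

-- ===== PORT B =====
def permutation_decrypt_alt (cipher : String) (key : String) : String :=
  let n : Int := PySem.Str.len key
  -- sorted(key) != [str(i) for i in range(n)]  (Python chars are 1-char strings)
  if n == 0 || !((PySem.List.sorted key.toList (fun c => c) false).map (fun c => String.ofList [c])
                  == (PySem.List.pyRange 0 n 1).map PySem.Int.toStr) then ""   -- raise ValueError (excluded by Pre_)
  else if !(PySem.Int.mod (PySem.Str.len cipher) n == 0) then ""               -- raise ValueError (excluded by Pre_)
  else
    -- inv = [0] * n; for i, ch in enumerate(key): inv[int(ch)] = i   (guarded: int(ch) ∈ [0, n))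
    let inv : List Int := (PySem.List.enumerate key.toList 0).foldl (fun a p =>
      a.set ((PySem.Int.ofChars? [p.2]).getD 0).toNat p.1) (List.replicate n.toNat 0)
    -- "".join(cipher[(p // n) * n + inv[p % n]] for p in range(len(cipher))).rstrip()
    PySem.Str.rstrip (String.ofList ((PySem.List.pyRange 0 (PySem.Str.len cipher) 1).map (fun p =>
      (PySem.Str.pyGet? cipher (PySem.Int.floordiv p n * n + PySem.List.pyGetD inv (PySem.Int.mod p n) 0)).getD ' ')))

-- ===== PRECONDITION & SPEC =====
-- Pre_ excludes exactly the inputs on which A raises ValueError: an invalid key (empty, longer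
-- than 10, or missing some digit 0..n-1) or a ciphertext whose length is not a multiple of n.
def Pre_permutation_decrypt (cipher : String) (key : String) : Prop :=
  key.toList ≠ [] ∧ key.toList.length ≤ 10 ∧
  (∀ i < key.toList.length, Char.ofNat (48 + i) ∈ key.toList) ∧
  cipher.toList.length % key.toList.length = 0

instance (cipher : String) (key : String) : Decidable (Pre_permutation_decrypt cipher key) := by
  unfold Pre_permutation_decrypt; infer_instance

def pvWitness_permutation_decrypt : String × String := ("abcdefghij", "0123456789")

def Spec_permutation_decrypt (cipher : String) (key : String) (out : String) : Prop := out = permutation_decrypt_alt cipher key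
instance (cipher : String) (key : String) (out : String) : Decidable (Spec_permutation_decrypt cipher key out) := by unfold Spec_permutation_decrypt; infer_instance

-- ===== CLAIM (what is proved, stated in full; the proofs are below) =====
def Claim_equal_permutation_decrypt : Prop := ∀ (cipher : String) (key : String), Dom_permutation_decrypt cipher key → Pre_permutation_decrypt cipher key → Spec_permutation_decrypt cipher key (permutation_decrypt cipher key)

-- ===== LEMMAS AND PROOFS =====

-- the digit value A and B read with int(c), and the digit character of k
def dVal (c : Char) : Nat := ((PySem.Int.ofChars? [c]).getD 0).toNat
def dChar (k : Nat) : Char := Char.ofNat (48 + k)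
def digitsL (n : Nat) : List Char := (List.range n).map dChar
-- the inverse permutation as a function: the (unique) position of digit j in the key
def invF (ks : List Char) (j : Nat) : Nat := ks.findIdx (· == dChar j)

lemma toStr_digit (k : Nat) (h : k < 10) : PySem.Int.toStr (k : Int) = String.ofList [dChar k] := by
  interval_cases k <;> rfl

lemma dVal_dChar (k : Nat) (h : k < 10) : dVal (dChar k) = k := by
  interval_cases k <;> rfl

lemma toNat_dChar (k : Nat) (h : k < 10) : (dChar k).toNat = 48 + k := by
  interval_cases k <;> rfl

lemma dChar_inj (i j : Nat) (hi : i < 10) (hj : j < 10) (h : dChar i = dChar j) : i = j := by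
  have heq : (dChar i).toNat = (dChar j).toNat := by rw [h]
  have := toNat_dChar i hi
  have := toNat_dChar j hj
  omega

lemma nodup_digitsL (n : Nat) (hn : n ≤ 10) : (digitsL n).Nodup := by
  refine (List.nodup_range).map_on ?_
  intro i hi j hj h
  exact dChar_inj i j (by simp at hi; omega) (by simp at hj; omega) h

lemma perm_of_pre (ks : List Char) (h2 : ks.length ≤ 10)
    (h3 : ∀ i < ks.length, dChar i ∈ ks) : ks.Perm (digitsL ks.length) := by
  have hsub : digitsL ks.length ⊆ ks := by
    intro c hc
    simp only [digitsL, List.mem_map, List.mem_range] at hc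
    obtain ⟨k, hk, rfl⟩ := hc
    exact h3 k hk
  have hlen : (digitsL ks.length).length = ks.length := by simp [digitsL]
  exact (((nodup_digitsL ks.length h2).subperm hsub).perm_of_length_le (by omega)).symm

-- ===== generic scatter (foldl of list.set over an enumerate) characterisation =====

lemma scatter_length {α β : Type} (f : Int × α → Nat) (g : Int × α → β) (l : List α) :
    ∀ (s : Int) (init : List β),
    ((PySem.List.enumerate l s).foldl (fun a p => a.set (f p) (g p)) init).length = init.length := by
  induction l with
  | nil => intro s init; simp [PySem.List.enumerate_nil]
  | cons x xs ih =>
      intro s init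
      rw [PySem.List.enumerate_cons, List.foldl_cons, ih]
      simp

lemma scatter_miss {α β : Type} (f : Int × α → Nat) (g : Int × α → β) (l : List α) :
    ∀ (s : Int) (init : List β) (j : Nat),
    (∀ p ∈ PySem.List.enumerate l s, f p ≠ j) →
    ((PySem.List.enumerate l s).foldl (fun a p => a.set (f p) (g p)) init)[j]? = init[j]? := by
  induction l with
  | nil => intro s init j _; simp [PySem.List.enumerate_nil]
  | cons x xs ih =>
      intro s init j h
      rw [PySem.List.enumerate_cons, List.foldl_cons]
      rw [ih (s + 1) _ j (fun p hp => h p (by rw [PySem.List.enumerate_cons]; exact List.mem_cons_of_mem _ hp))]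
      exact List.getElem?_set_ne (h (s, x) (by rw [PySem.List.enumerate_cons]; exact List.mem_cons_self))

lemma scatter_hit {α β : Type} (f : Int × α → Nat) (g : Int × α → β) (l : List α) :
    ∀ (s : Int) (init : List β) (j k : Nat) (hk : k < l.length),
    f (s + k, l[k]) = j →
    (∀ (k' : Nat) (hk' : k' < l.length), k < k' → f (s + k', l[k']) ≠ j) →
    j < init.length →
    ((PySem.List.enumerate l s).foldl (fun a p => a.set (f p) (g p)) init)[j]? = some (g (s + k, l[k])) := by
  induction l with
  | nil => intro s init j k hk; simp at hk
  | cons x xs ih =>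
      intro s init j k hk hhit hlater hj
      rw [PySem.List.enumerate_cons, List.foldl_cons]
      cases k with
      | zero =>
          simp only [List.getElem_cons_zero] at hhit
          have hs : s + (0 : Nat) = s := by push_cast; ring
          rw [hs] at hhit
          rw [scatter_miss]
          · rw [hhit, List.getElem?_set_self hj, hs]; simp
          · intro p hp
            rw [PySem.List.mem_enumerate_iff] at hp
            obtain ⟨k'', hk'', rfl⟩ := hp
            have h1 : (k'' + 1 : Nat) < (x :: xs).length := by simp; omega
            have h2 : s + 1 + (k'' : Int) = s + ((k'' + 1 : Nat) : Int) := by push_cast; ring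
            have := hlater (k'' + 1) h1 (by omega)
            rw [h2]
            simpa using this
      | succ k' =>
          have hk2 : k' < xs.length := by simpa using hk
          have h2 : s + 1 + (k' : Int) = s + ((k' + 1 : Nat) : Int) := by push_cast; ring
          rw [ih (s + 1) _ j k' hk2 (by rw [h2]; simpa using hhit)
              (fun k'' hk'' hlt => by
                have h3 : s + 1 + (k'' : Int) = s + ((k'' + 1 : Nat) : Int) := by push_cast; ring
                rw [h3]
                have := hlater (k'' + 1) (by simp; omega) (by omega)
                simpa using this)
              (by simpa using hj)]
          rw [h2]
          simp

-- ===== facts about a valid key =====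

lemma invF_spec (ks : List Char) (n j : Nat) (hperm : ks.Perm (digitsL n)) (hj : j < n) :
    invF ks j < ks.length ∧ ks[invF ks j]'(by
      exact List.findIdx_lt_length.mpr ⟨dChar j, hperm.mem_iff.mpr (by simp [digitsL]; exact ⟨j, hj, rfl⟩), by simp⟩) = dChar j := by
  have hmem : dChar j ∈ ks := hperm.mem_iff.mpr (by simp [digitsL]; exact ⟨j, hj, rfl⟩)
  have hlt : invF ks j < ks.length := List.findIdx_lt_length.mpr ⟨dChar j, hmem, by simp⟩
  refine ⟨hlt, ?_⟩
  have := List.findIdx_getElem (w := hlt)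
  simpa [invF] using this

lemma invF_uniq (ks : List Char) (n j k : Nat) (hperm : ks.Perm (digitsL n)) (hn : n ≤ 10) (hj : j < n)
    (hk : k < ks.length) (h : ks[k] = dChar j) : k = invF ks j := by
  obtain ⟨hlt, hget⟩ := invF_spec ks n j hperm hj
  have hnd : ks.Nodup := hperm.nodup_iff.mpr (nodup_digitsL n hn)
  have : ks[k]'hk = ks[invF ks j]'hlt := by rw [h]; exact hget.symm
  exact (List.Nodup.getElem_inj_iff hnd).mp this

lemma dVal_ks (ks : List Char) (n k : Nat) (hperm : ks.Perm (digitsL n)) (hn : n ≤ 10)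
    (hk : k < ks.length) : ∃ j < n, ks[k] = dChar j ∧ dVal ks[k] = j := by
  have hmem : ks[k] ∈ digitsL n := hperm.mem_iff.mp (List.getElem_mem hk)
  simp only [digitsL, List.mem_map, List.mem_range] at hmem
  obtain ⟨j, hjn, hjeq⟩ := hmem
  exact ⟨j, hjn, hjeq.symm, by rw [← hjeq]; exact dVal_dChar j (by omega)⟩

-- ===== range-splitting for the blocked traversal =====

lemma range_mul_flatMap {α : Type} (n : Nat) (F : Nat → α) :
    ∀ q : Nat, (List.range (q * n)).map F
      = (List.range q).flatMap (fun t => (List.range n).map (fun j => F (t * n + j))) := by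
  intro q
  induction q with
  | zero => simp
  | succ q ih =>
      have : (q + 1) * n = q * n + n := by ring
      rw [this, List.range_add, List.map_append, List.range_succ, List.flatMap_append, ih]
      simp [List.map_map, Function.comp]

-- ===== guards =====

lemma valid_of_pre (key : String) (h0 : key.toList ≠ []) (h2 : key.toList.length ≤ 10)
    (h3 : ∀ i < key.toList.length, dChar i ∈ key.toList) :
    is_valid_permutation_key key = true := by
  unfold is_valid_permutation_key
  rw [if_neg]
  · rw [List.all_eq_true]
    intro x hx
    rw [PySem.Str.len_eq, PySem.List.pyRange_one] at hx
    simp only [List.mem_map, List.mem_range] at hx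
    obtain ⟨k, hk, rfl⟩ := hx
    have hk' : k < key.toList.length := by
      have : ((key.toList.length : Int) - 0).toNat = key.toList.length := by omega
      omega
    have : (0 : Int) + (k : Int) = ((k : Nat) : Int) := by ring
    rw [this, toStr_digit k (by omega)]
    rw [PySem.Str.isIn_iff_infix]
    simp only [String.toList_ofList]
    exact (List.singleton_infix_iff _ _).mpr (h3 k hk')
  · rw [PySem.Str.len_eq]
    have hlen : key.toList.length ≠ 0 := by
      intro hc; exact h0 (List.length_eq_zero_iff.mp hc)
    intro hc
    simp only [Bool.or_eq_true, beq_iff_eq, decide_eq_true_eq] at hc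
    omega

lemma digitsL_pairwise (n : Nat) (hn : n ≤ 10) : (digitsL n).Pairwise (fun a b => a < b) := by
  unfold digitsL
  rw [List.pairwise_map]
  have h : ∀ i j : Nat, i < j → j < 10 → dChar i < dChar j := by
    intro i j h1 h2
    interval_cases j <;> interval_cases i <;> decide
  exact (List.pairwise_lt_range).imp_of_mem (by
    intro a b ha hb hab
    exact h a b hab (by simp at hb; omega))

lemma sorted_key_eq (key : String) (n : Nat) (hperm : key.toList.Perm (digitsL n)) (hn : n ≤ 10) :
    (PySem.List.sorted key.toList (fun c => c) false).map (fun c => String.ofList [c])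
      = (PySem.List.pyRange 0 (n : Int) 1).map PySem.Int.toStr := by
  rw [PySem.List.sorted_eq_of_perm_of_pairwise_lt key.toList (digitsL n) (fun c => c) hperm.symm
    (digitsL_pairwise n hn)]
  rw [PySem.List.pyRange_one]
  have : ((n : Int) - 0).toNat = n := by omega
  rw [this]
  unfold digitsL
  rw [List.map_map, List.map_map]
  apply List.map_congr_left
  intro k hk
  simp only [List.mem_range] at hk
  simp only [Function.comp]
  have : (0 : Int) + (k : Int) = ((k : Nat) : Int) := by ring
  rw [this, toStr_digit k (by omega)]

-- ===== the two scatter loops, characterised =====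

lemma pb_eq (key : String) (L : List Char) (n : Nat) (hperm : key.toList.Perm (digitsL n))
    (hn10 : n ≤ 10) (hnlen : key.toList.length = n)
    (t : Nat) (hblen : t * n + n ≤ L.length) :
    (PySem.List.enumerate ((L.drop (t * n)).take n) 0).foldl (fun pb p =>
        pb.set ((PySem.Int.ofChars? [(PySem.Str.pyGet? key p.1).getD ' ']).getD 0).toNat p.2)
      (List.replicate n ' ')
    = (List.range n).map (fun j => L.getD (t * n + invF key.toList j) ' ') := by
  have hblock : ((L.drop (t * n)).take n).length = n := by
    simp [List.length_take, List.length_drop]; omega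
  apply List.ext_getElem?
  intro j
  by_cases hj : j < n
  · obtain ⟨hklt, hkget⟩ := invF_spec key.toList n j hperm hj
    have hkn : invF key.toList j < n := by omega
    have hhit : (fun p : Int × Char => ((PySem.Int.ofChars? [(PySem.Str.pyGet? key p.1).getD ' ']).getD 0).toNat)
        ((0 : Int) + (invF key.toList j : Nat), ((L.drop (t * n)).take n)[invF key.toList j]'(by omega)) = j := by
      simp only [zero_add, PySem.Str.pyGet?_natCast]
      rw [List.getElem?_eq_getElem hklt]
      show dVal (key.toList[invF key.toList j]'hklt) = j
      have hkget2 : key.toList[invF key.toList j]'hklt = dChar j := hkget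
      rw [hkget2]
      exact dVal_dChar j (by omega)
    have hlater : ∀ (k' : Nat) (hk' : k' < ((L.drop (t * n)).take n).length), invF key.toList j < k' →
        (fun p : Int × Char => ((PySem.Int.ofChars? [(PySem.Str.pyGet? key p.1).getD ' ']).getD 0).toNat)
          ((0 : Int) + (k' : Nat), ((L.drop (t * n)).take n)[k']'hk') ≠ j := by
      intro k' hk' hlt hcon
      simp only [zero_add, PySem.Str.pyGet?_natCast] at hcon
      have hk'len : k' < key.toList.length := by omega
      rw [List.getElem?_eq_getElem hk'len] at hcon
      have hcon' : dVal (key.toList[k']'hk'len) = j := hcon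
      obtain ⟨j', hj', hc1, hc2⟩ := dVal_ks key.toList n k' hperm hn10 hk'len
      rw [hc2] at hcon'
      rw [hcon'] at hc1
      have := invF_uniq key.toList n j k' hperm hn10 hj hk'len hc1
      omega
    rw [scatter_hit (fun p : Int × Char => ((PySem.Int.ofChars? [(PySem.Str.pyGet? key p.1).getD ' ']).getD 0).toNat)
        (fun p : Int × Char => p.2) ((L.drop (t * n)).take n) 0 (List.replicate n ' ') j
        (invF key.toList j) (by omega) hhit hlater (by simp; omega)]
    have hgetblk : ((L.drop (t * n)).take n)[invF key.toList j]'(by omega)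
        = L[t * n + invF key.toList j]'(by omega) := by
      rw [List.getElem_take, List.getElem_drop]
    rw [List.getElem?_map, List.getElem?_range hj]
    simp only [Option.map_some, hgetblk]
    rw [List.getD_eq_getElem L ' ' (by omega)]
  · rw [List.getElem?_eq_none, List.getElem?_eq_none]
    · simp only [List.length_map, List.length_range]; omega
    · have := scatter_length (fun p : Int × Char =>
        ((PySem.Int.ofChars? [(PySem.Str.pyGet? key p.1).getD ' ']).getD 0).toNat)
        (fun p : Int × Char => p.2) ((L.drop (t * n)).take n) 0 (List.replicate n ' ')
      rw [this]; simp only [List.length_replicate]; omega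

lemma inv_eq (key : String) (n : Nat) (hperm : key.toList.Perm (digitsL n)) (hn10 : n ≤ 10)
    (hnlen : key.toList.length = n) (j : Nat) (hj : j < n) :
    PySem.List.pyGetD ((PySem.List.enumerate key.toList 0).foldl (fun a p =>
        a.set ((PySem.Int.ofChars? [p.2]).getD 0).toNat p.1) (List.replicate n 0)) ((j : Nat) : Int) 0
    = ((invF key.toList j : Nat) : Int) := by
  obtain ⟨hklt, hkget⟩ := invF_spec key.toList n j hperm hj
  have hlen := scatter_length (fun p : Int × Char => ((PySem.Int.ofChars? [p.2]).getD 0).toNat)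
    (fun p : Int × Char => p.1) key.toList 0 (List.replicate n 0)
  have hhit : (fun p : Int × Char => ((PySem.Int.ofChars? [p.2]).getD 0).toNat)
      ((0 : Int) + (invF key.toList j : Nat), key.toList[invF key.toList j]'hklt) = j := by
    show dVal (key.toList[invF key.toList j]'hklt) = j
    have hkget2 : key.toList[invF key.toList j]'hklt = dChar j := hkget
    rw [hkget2]
    exact dVal_dChar j (by omega)
  have hlater : ∀ (k' : Nat) (hk' : k' < key.toList.length), invF key.toList j < k' →
      (fun p : Int × Char => ((PySem.Int.ofChars? [p.2]).getD 0).toNat)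
        ((0 : Int) + (k' : Nat), key.toList[k']'hk') ≠ j := by
    intro k' hk' hlt hcon
    have hcon' : dVal (key.toList[k']'hk') = j := hcon
    obtain ⟨j', hj', hc1, hc2⟩ := dVal_ks key.toList n k' hperm hn10 hk'
    rw [hc2] at hcon'
    rw [hcon'] at hc1
    have := invF_uniq key.toList n j k' hperm hn10 hj hk' hc1
    omega
  have hres := scatter_hit (fun p : Int × Char => ((PySem.Int.ofChars? [p.2]).getD 0).toNat)
    (fun p : Int × Char => p.1) key.toList 0 (List.replicate n 0) j (invF key.toList j)
    hklt hhit hlater (by simp only [List.length_replicate]; omega)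
  have hidx : j < ((PySem.List.enumerate key.toList 0).foldl (fun a p =>
      a.set ((PySem.Int.ofChars? [p.2]).getD 0).toNat p.1) (List.replicate n 0)).length := by
    rw [hlen]; simp only [List.length_replicate]; omega
  rw [PySem.List.pyGetD_eq_getElem _ 0 (by omega) (by exact_mod_cast hidx)]
  simp only [Int.toNat_natCast]
  have h5 := List.getElem?_eq_getElem hidx
  rw [hres] at h5
  have h6 := Option.some.inj h5
  rw [← h6]
  ring

lemma pyRange_step_blocks (m n : Nat) (hn : 0 < n) (hd : m % n = 0) :
    PySem.List.pyRange 0 (m : Int) (n : Int)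
      = (List.range (m / n)).map (fun t => ((t * n : Nat) : Int)) := by
  rw [PySem.List.pyRange_of_pos 0 (m : Int) (by exact_mod_cast hn)]
  have hcnt : (if (0 : Int) < (m : Int) then (((m : Int) - 0 + (n : Int) - 1) / (n : Int)).toNat else 0) = m / n := by
    by_cases hm : 0 < m
    · rw [if_pos (by exact_mod_cast hm)]
      have h1 : ((m : Int) - 0 + (n : Int) - 1) = ((m + n - 1 : Nat) : Int) := by push_cast; omega
      rw [h1, ← Int.natCast_div, Int.toNat_natCast]
      obtain ⟨q, rfl⟩ := Nat.dvd_of_mod_eq_zero hd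
      rw [Nat.mul_div_cancel_left q hn]
      have h2 : n * q + n - 1 = n * q + (n - 1) := by omega
      rw [h2, Nat.mul_add_div hn, Nat.div_eq_of_lt (by omega)]
      omega
    · have hm0 : m = 0 := by omega
      subst hm0
      simp [Nat.zero_div]
  rw [hcnt]
  apply List.map_congr_left
  intro t ht
  push_cast
  ring

-- ===== VERDICT (by name: the statement is the Claim_ definition above) =====

lemma flatMap_congr_mem {α β : Type} (l : List α) (f g : α → List β)
    (h : ∀ x ∈ l, f x = g x) : l.flatMap f = l.flatMap g := by
  induction l with
  | nil => rfl
  | cons x xs ih =>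
      rw [List.flatMap_cons, List.flatMap_cons, h x List.mem_cons_self,
        ih (fun y hy => h y (List.mem_cons_of_mem x hy))]

theorem permutation_decrypt_spec : Claim_equal_permutation_decrypt := by
  intro cipher key hdom hpre
  obtain ⟨h1, h2, h3, h4⟩ := hpre
  have hn0 : 0 < key.toList.length := List.length_pos_iff.mpr h1
  have hperm : key.toList.Perm (digitsL key.toList.length) := perm_of_pre key.toList h2 h3
  have hvalid : is_valid_permutation_key key = true := valid_of_pre key h1 h2 h3
  have hsort := sorted_key_eq key key.toList.length hperm h2
  show permutation_decrypt cipher key = permutation_decrypt_alt cipher key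
  unfold permutation_decrypt permutation_decrypt_alt
  rw [hvalid]
  rw [if_neg (by simp)]
  simp only [PySem.Str.len_eq]
  have hne0 : (((key.toList.length : Int) == 0) : Bool) = false := by
    simp only [beq_eq_false_iff_ne, ne_eq]
    omega
  have hmod : PySem.Int.mod (cipher.toList.length : Int) (key.toList.length : Int) = 0 := by
    rw [PySem.Int.mod_natCast, h4]
    rfl
  rw [hmod]
  simp only [hne0, Bool.false_or]
  rw [if_neg (by simp)]
  rw [hsort]
  rw [if_neg (by simp)]
  rw [if_neg (by simp)]
  -- both branches taken; now the two character lists coincide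
  congr 1
  congr 1
  -- A side: blocks
  rw [pyRange_step_blocks cipher.toList.length key.toList.length hn0 h4, List.foldl_map]
  rw [PySem.List.foldl_append_eq_flatMap, List.nil_append]
  have hqm : cipher.toList.length = (cipher.toList.length / key.toList.length) * key.toList.length :=
    (Nat.div_mul_cancel (Nat.dvd_of_mod_eq_zero h4)).symm
  -- rewrite each block's scatter into a gather
  have hA : (List.range (cipher.toList.length / key.toList.length)).flatMap (fun t =>
      List.foldl
        (fun pb p => pb.set ((PySem.Int.ofChars? [(PySem.Str.pyGet? key p.1).getD ' ']).getD 0).toNat p.2)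
        (List.replicate ((key.toList.length : Int)).toNat ' ')
        (PySem.List.enumerate
          (PySem.Str.slice cipher (some ((t * key.toList.length : Nat) : Int))
            (some (((t * key.toList.length : Nat) : Int) + (key.toList.length : Int)))).toList 0))
      = (List.range (cipher.toList.length / key.toList.length)).flatMap (fun t =>
          (List.range key.toList.length).map (fun j =>
            cipher.toList.getD (t * key.toList.length + invF key.toList j) ' ')) := by
    apply flatMap_congr_mem
    intro t ht
    simp only [List.mem_range] at ht
    have hblen : t * key.toList.length + key.toList.length ≤ cipher.toList.length := by
      conv_rhs => rw [hqm]
      have : t + 1 ≤ cipher.toList.length / key.toList.length := ht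
      calc t * key.toList.length + key.toList.length = (t + 1) * key.toList.length := by ring
        _ ≤ (cipher.toList.length / key.toList.length) * key.toList.length :=
            Nat.mul_le_mul_right _ this
    have hslice : (PySem.Str.slice cipher (some ((t * key.toList.length : Nat) : Int))
        (some (((t * key.toList.length : Nat) : Int) + (key.toList.length : Int)))).toList
        = (cipher.toList.drop (t * key.toList.length)).take key.toList.length := by
      rw [PySem.Str.toList_slice, PySem.Chars.slice_eq_listSlice, PySem.List.slice_natCast_add]
    rw [hslice]
    rw [show (((key.toList.length : Int)).toNat) = key.toList.length from Int.toNat_natCast _]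
    exact pb_eq key cipher.toList key.toList.length hperm h2 rfl t hblen
  rw [hA]
  -- B side: the gather comprehension
  rw [PySem.List.pyRange_one]
  rw [show ((cipher.toList.length : Int) - 0).toNat = cipher.toList.length by omega]
  rw [List.map_map]
  have hB : (List.range cipher.toList.length).map ((fun p =>
        (PySem.Str.pyGet? cipher (PySem.Int.floordiv p (key.toList.length : Int) * (key.toList.length : Int)
          + PySem.List.pyGetD ((PySem.List.enumerate key.toList 0).foldl (fun a p =>
              a.set ((PySem.Int.ofChars? [p.2]).getD 0).toNat p.1)
              (List.replicate ((key.toList.length : Int)).toNat 0))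
            (PySem.Int.mod p (key.toList.length : Int)) 0)).getD ' ') ∘ (fun k : Nat => (0 : Int) + (k : Int)))
      = (List.range cipher.toList.length).map (fun k =>
          cipher.toList.getD (k / key.toList.length * key.toList.length + invF key.toList (k % key.toList.length)) ' ') := by
    apply List.map_congr_left
    intro k hk
    simp only [List.mem_range] at hk
    simp only [Function.comp, zero_add]
    rw [show ((key.toList.length : Int)).toNat = key.toList.length from Int.toNat_natCast _]
    rw [PySem.Int.floordiv_natCast, PySem.Int.mod_natCast]
    rw [inv_eq key key.toList.length hperm h2 rfl (k % key.toList.length) (Nat.mod_lt k hn0)]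
    rw [show ((k / key.toList.length : Nat) : Int) * (key.toList.length : Int)
        + ((invF key.toList (k % key.toList.length) : Nat) : Int)
        = ((k / key.toList.length * key.toList.length + invF key.toList (k % key.toList.length) : Nat) : Int) by push_cast; ring]
    have hinv : invF key.toList (k % key.toList.length) < key.toList.length :=
      (invF_spec key.toList key.toList.length (k % key.toList.length) hperm (Nat.mod_lt k hn0)).1
    have hidx : k / key.toList.length * key.toList.length + invF key.toList (k % key.toList.length)
        < cipher.toList.length := by
      have hdivlt : k / key.toList.length < cipher.toList.length / key.toList.length :=
        Nat.div_lt_div_of_lt_of_dvd (Nat.dvd_of_mod_eq_zero h4) hk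
      have : k / key.toList.length * key.toList.length + key.toList.length
          ≤ (cipher.toList.length / key.toList.length) * key.toList.length := by
        calc k / key.toList.length * key.toList.length + key.toList.length
            = (k / key.toList.length + 1) * key.toList.length := by ring
          _ ≤ (cipher.toList.length / key.toList.length) * key.toList.length :=
              Nat.mul_le_mul_right _ hdivlt
      omega
    rw [PySem.Str.pyGet?_natCast, List.getElem?_eq_getElem hidx]
    simp only [Option.getD_some]
    rw [List.getD_eq_getElem cipher.toList ' ' hidx]
  rw [hB]
  -- final: blocked gather = flat gather
  conv_rhs => rw [hqm]
  rw [range_mul_flatMap]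
  apply flatMap_congr_mem
  intro t ht
  apply List.map_congr_left
  intro j hj
  simp only [List.mem_range] at hj
  have hdd : (t * key.toList.length + j) / key.toList.length = t := by
    rw [show t * key.toList.length + j = key.toList.length * t + j by ring, Nat.mul_add_div hn0,
      Nat.div_eq_of_lt hj]
    omega
  have hmm : (t * key.toList.length + j) % key.toList.length = j := by
    rw [show t * key.toList.length + j = key.toList.length * t + j by ring, Nat.mul_add_mod,
      Nat.mod_eq_of_lt hj]
  rw [hdd, hmm]
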